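-- pv_equiv track=rewrite | github.com/pendwmpian/Arduino_Resistance | record.py | decodeCOBS
-- ===== SOURCE A (Python) =====
-- def decodeCOBS(data):
--     zero = data[0]
--     if zero > 8:
--         return False, data
--     for i in range(1, 8):
--         zero -= 1
--         if zero == 0:
--             zero = data[i]
--             data[i] = 0
--     # check sum
--     sum = 0
--     for i in range(1, 7):
--         sum += data[i]
--     if sum & 0xFF != data[7]:
--         return False, data
--     return True, data[1:7]
-- ===== SOURCE B (Python) =====
-- def decodeCOBS(data):
--     pos = data[0]
--     if pos > 8:
--         return False, data
--     # follow the COBS offset chain instead of decrementing a counter at every index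
--     while 1 <= pos <= 7:
--         nxt = data[pos]
--         data[pos] = 0
--         if nxt <= 0:
--             break
--         pos += nxt
--     if sum(data[1:7]) & 0xFF != data[7]:
--         return False, data
--     return True, data[1:7]
-- ===== Notes on version B (the rewrite author's own statement) =====
-- stated objective: alternative
-- what changed: Replaces the decrement-a-counter scan over all indices 1..7 with a pointer-chasing while loop that jumps directly along the COBS offset chain, and computes the checksum as sum(data[1:7]) & 0xFF instead of an index loop.
import Mathlib
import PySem

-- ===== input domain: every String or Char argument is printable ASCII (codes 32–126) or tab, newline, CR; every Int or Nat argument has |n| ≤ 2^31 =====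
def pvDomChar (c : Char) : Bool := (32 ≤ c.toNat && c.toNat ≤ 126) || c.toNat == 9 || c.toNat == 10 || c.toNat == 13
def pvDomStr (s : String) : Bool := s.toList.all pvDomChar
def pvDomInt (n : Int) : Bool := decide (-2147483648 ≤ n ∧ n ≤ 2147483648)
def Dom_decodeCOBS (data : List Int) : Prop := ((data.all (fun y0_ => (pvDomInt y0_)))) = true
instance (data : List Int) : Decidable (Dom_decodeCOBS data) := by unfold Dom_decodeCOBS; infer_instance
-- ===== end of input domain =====

-- B replaces A's decrement-counter scan of indices 1..7 with a pointer-chasing loop along the COBS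
-- offset chain (objective: alternative).  Both Pythons mutate `data` in place identically; the
-- equivalence proved here is about the RETURN value (which includes the mutated list on failure).

-- ===== PORT A =====
-- the 'for i in range(1, 8)' loop, carried over the list of remaining indices
def decodeCOBS_loop : List Int → Int → List Int → Int × List Int
  | [], z, d => (z, d)
  | i :: is, z, d =>
    let z := z - 1
    if z = 0 then
      decodeCOBS_loop is (PySem.List.pyGetD d i 0) (PySem.List.pySetD d i 0)
    else
      decodeCOBS_loop is z d

def decodeCOBS (data : List Int) : Bool × List Int :=
  let zero := PySem.List.pyGetD data 0 0
  if zero > 8 then (false, data)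
  else
    let data := (decodeCOBS_loop (PySem.List.pyRange 1 8 1) zero data).2
    let s := (PySem.List.pyRange 1 7 1).foldl (fun s i => s + PySem.List.pyGetD data i 0) 0
    -- 'sum & 0xFF' is PySem.Int.band s 255, Python-exact on negatives
    if PySem.Int.band s 255 ≠ PySem.List.pyGetD data 7 0 then (false, data)
    else (true, PySem.List.slice data (some 1) (some 7))

-- ===== PORT B =====
-- the 'while 1 <= pos <= 7' chain-following loop of Source B (pos strictly increases, hence terminates)
def decodeCOBS_chase (d : List Int) (pos : Int) : List Int :=
  if h : 1 ≤ pos ∧ pos ≤ 7 then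
    let nxt := PySem.List.pyGetD d pos 0
    let d' := PySem.List.pySetD d pos 0
    if hn : nxt ≤ 0 then d' else decodeCOBS_chase d' (pos + nxt)
  else d
termination_by (8 - pos).toNat
decreasing_by omega

def decodeCOBS_alt (data : List Int) : Bool × List Int :=
  let pos := PySem.List.pyGetD data 0 0
  if pos > 8 then (false, data)
  else
    let data := decodeCOBS_chase data pos
    let s := (PySem.List.slice data (some 1) (some 7)).sum
    if PySem.Int.band s 255 ≠ PySem.List.pyGetD data 7 0 then (false, data)
    else (true, PySem.List.slice data (some 1) (some 7))

-- ===== PRECONDITION & SPEC =====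
-- Pre_ excludes exactly the inputs on which Python A raises IndexError: the empty list, and
-- lists shorter than 8 whose first element is ≤ 8 (the loop then reads data[1..7]).
def Pre_decodeCOBS (data : List Int) : Prop :=
  data ≠ [] ∧ (8 < data.headD 0 ∨ 8 ≤ data.length)
instance (data : List Int) : Decidable (Pre_decodeCOBS data) := by
  unfold Pre_decodeCOBS; infer_instance

def pvWitness_decodeCOBS : List Int := [1, 0, 0, 0, 0, 0, 0, 0]

def Spec_decodeCOBS (data : List Int) (out : Bool × List Int) : Prop := out = decodeCOBS_alt data
instance (data : List Int) (out : Bool × List Int) : Decidable (Spec_decodeCOBS data out) := by unfold Spec_decodeCOBS; infer_instance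

-- ===== CLAIM (what is proved, stated in full; the proofs are below) =====
def Claim_equal_decodeCOBS : Prop := ∀ (data : List Int), Dom_decodeCOBS data → Pre_decodeCOBS data → Spec_decodeCOBS data (decodeCOBS data)

-- ===== LEMMAS AND PROOFS =====

-- once the counter is ≤ 0 it never hits 0 again, so A's loop no longer touches the list
theorem decodeCOBS_loop_nonpos (is : List Int) (z : Int) (d : List Int) (hz : z ≤ 0) :
    (decodeCOBS_loop is z d).2 = d := by
  induction is generalizing z with
  | nil => rfl
  | cons i is ih =>
    simp only [decodeCOBS_loop]
    rw [if_neg (by omega)]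
    exact ih (z - 1) (by omega)

-- the list A's loop produces from index i with counter z ≥ 1 is the chase from position i + z - 1
theorem decodeCOBS_loop_eq_chase (k : Nat) :
    ∀ (i z : Int) (d : List Int), i + k = 8 → 1 ≤ i → 1 ≤ z →
      (decodeCOBS_loop (PySem.List.pyRange i 8 1) z d).2 = decodeCOBS_chase d (i + z - 1) := by
  induction k with
  | zero =>
    intro i z d hik hi hz
    rw [PySem.List.pyRange_one_eq_nil (by omega)]
    rw [decodeCOBS_chase, dif_neg (by omega)]
    rfl
  | succ k ih =>
    intro i z d hik hi hz
    rw [PySem.List.pyRange_one_cons (by omega)]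
    simp only [decodeCOBS_loop]
    by_cases hz1 : z = 1
    · subst hz1
      rw [if_pos (by omega)]
      have hchase : decodeCOBS_chase d (i + 1 - 1) = decodeCOBS_chase d i := by norm_num
      rw [hchase, decodeCOBS_chase, dif_pos ⟨hi, by omega⟩]
      by_cases hn : PySem.List.pyGetD d i 0 ≤ 0
      · rw [dif_pos hn]
        exact decodeCOBS_loop_nonpos _ _ _ hn
      · rw [dif_neg hn]
        have := ih (i + 1) (PySem.List.pyGetD d i 0) (PySem.List.pySetD d i 0)
          (by omega) (by omega) (by omega)
        rw [this]
        ring_nf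
    · rw [if_neg (by omega)]
      have := ih (i + 1) (z - 1) d (by omega) (by omega) (by omega)
      rw [this]
      ring_nf

-- both checksum computations agree on lists of length ≥ 8
theorem checksum_eq (d : List Int) (h : 8 ≤ d.length) :
    (PySem.List.pyRange 1 7 1).foldl (fun s i => s + PySem.List.pyGetD d i 0) 0
      = (PySem.List.slice d (some 1) (some 7)).sum := by
  match d, h with
  | a :: b :: c :: e :: f :: g :: p :: q :: t, _ =>
    have hr : PySem.List.pyRange 1 7 1 = [1, 2, 3, 4, 5, 6] := by decide
    rw [hr]
    simp only [List.foldl]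
    simp [PySem.List.pyGetD_ofNat', PySem.List.slice, PySem.List.clampIdx]
    ring

-- chase only rewrites entries in place, so it preserves the length
theorem decodeCOBS_chase_length (d : List Int) (pos : Int) :
    (decodeCOBS_chase d pos).length = d.length := by
  fun_induction decodeCOBS_chase d pos with
  | case1 d pos h nxt d' hn => simp [d', PySem.List.length_pySetD]
  | case2 d pos h nxt d' hn ih =>
    rw [ih]; simp [d', PySem.List.length_pySetD]
  | case3 => rfl

-- A's whole mutation phase equals B's chase, for any start value ≤ 8
theorem mutation_eq (d0 : Int) (rest : List Int) (h8 : ¬ 8 < d0) :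
    (decodeCOBS_loop (PySem.List.pyRange 1 8 1) d0 (d0 :: rest)).2
      = decodeCOBS_chase (d0 :: rest) d0 := by
  by_cases h1 : 1 ≤ d0
  · have := decodeCOBS_loop_eq_chase 7 1 d0 (d0 :: rest) (by omega) (by omega) h1
    rw [this]; norm_num
  · rw [decodeCOBS_loop_nonpos _ _ _ (by omega)]
    rw [decodeCOBS_chase, dif_neg (by omega)]

-- ===== VERDICT (by name: the statement is the Claim_ definition above) =====
theorem decodeCOBS_spec : Claim_equal_decodeCOBS := by
  intro data _hdom hpre
  unfold Spec_decodeCOBS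
  obtain ⟨hne, hor⟩ := hpre
  cases data with
  | nil => exact absurd rfl hne
  | cons d0 rest =>
    simp only [decodeCOBS, decodeCOBS_alt, PySem.List.pyGetD_zero_cons]
    by_cases h8 : 8 < d0
    · rw [if_pos h8, if_pos h8]
    · rw [if_neg h8, if_neg h8]
      have hlen : 8 ≤ (d0 :: rest).length := by
        rcases hor with h | h
        · simp only [List.headD_cons] at h; omega
        · exact h
      rw [mutation_eq d0 rest h8]
      rw [checksum_eq _ (by rw [decodeCOBS_chase_length]; exact hlen)]
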